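-- pv_equiv track=rewrite | github.com/Aminorer/Test_anonymization_tools | src/variant_manager_ui.py | get_page_distribution
-- ===== SOURCE A (Python) =====
-- from collections import OrderedDict
-- from typing import Any, Dict, Iterable, List, Tuple
--
-- def get_page_distribution(
--     positions: Iterable[Tuple[int, int]] | Iterable[int],
--     total_pages: int | None = None,
--     chunk: int = 5,
-- ) -> Dict[str, int]:
--     """Return the distribution of occurrences by ranges of ``chunk`` pages.
--
--     Parameters
--     ----------
--     positions:
--         Iterable containing either page numbers or (page, position) tuples.
--     total_pages:
--         Maximum page number to consider. If ``None`` it is inferred from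
--         ``positions``.
--     chunk:
--         Size of each page range.
--     """
--     pages: List[int] = []
--     for pos in positions:
--         if isinstance(pos, (list, tuple)):
--             pages.append(int(pos[0]))
--         else:
--             pages.append(int(pos))
--
--     max_page = total_pages or (max(pages) if pages else 0)
--     distribution: Dict[str, int] = OrderedDict()
--     for page in pages:
--         start = ((page - 1) // chunk) * chunk + 1
--         end = min(start + chunk - 1, max_page)
--         label = f"Pages {start}-{end}"
--         distribution[label] = distribution.get(label, 0) + 1
--     return distribution
-- ===== SOURCE B (Python) =====
-- from collections import OrderedDict
--
--
-- def _groups(labels):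
--     """Extract the first label's whole group, then recurse on what is left."""
--     if not labels:
--         return []
--     lab = labels[0]
--     rest = [x for x in labels if x != lab]
--     return [(lab, len(labels) - len(rest))] + _groups(rest)
--
--
-- def get_page_distribution(positions, total_pages=None, chunk=5):
--     pages = [int(pos[0]) if isinstance(pos, (list, tuple)) else int(pos)
--              for pos in positions]
--     max_page = total_pages or (max(pages) if pages else 0)
--     labels = [f"Pages {((p - 1) // chunk) * chunk + 1}-"
--               f"{min(((p - 1) // chunk) * chunk + chunk, max_page)}"
--               for p in pages]
--     return OrderedDict(_groups(labels))
-- ===== Notes on version B (the rewrite author's own statement) =====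
-- stated objective: alternative
-- what changed: Replaces A's single-pass OrderedDict tally with a recursive extract-group partition: repeatedly take the first label, obtain its count as the length drop after filtering that label out, and recurse on the remaining list, so counting uses no dictionary at all.
import Mathlib
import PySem

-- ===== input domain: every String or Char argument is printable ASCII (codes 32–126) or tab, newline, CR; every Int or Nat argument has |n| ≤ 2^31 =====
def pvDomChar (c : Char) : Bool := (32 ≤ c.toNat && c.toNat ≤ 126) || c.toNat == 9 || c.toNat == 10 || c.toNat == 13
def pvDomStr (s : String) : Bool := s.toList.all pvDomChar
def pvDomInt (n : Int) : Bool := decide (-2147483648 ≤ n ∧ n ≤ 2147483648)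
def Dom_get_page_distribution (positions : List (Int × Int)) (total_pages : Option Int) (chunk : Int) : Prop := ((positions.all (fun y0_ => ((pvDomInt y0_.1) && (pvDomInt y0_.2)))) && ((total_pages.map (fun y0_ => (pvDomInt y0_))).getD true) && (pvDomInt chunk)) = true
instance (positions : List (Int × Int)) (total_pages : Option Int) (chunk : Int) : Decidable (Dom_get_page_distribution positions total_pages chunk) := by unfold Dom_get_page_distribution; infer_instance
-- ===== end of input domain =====

-- B replaces A's single-pass OrderedDict tally with a recursive extract-group partition
-- (take the first label, count its group as a length drop, filter it out, recurse) — an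
-- alternative decomposition with no dictionary during counting, not faster.

-- Both Pythons contain the same range-label expression and the same
-- `total_pages or (max(pages) if pages else 0)` fallback; shared helpers for those.
def pvLabel (chunk max_page page : Int) : String :=
  let start := PySem.Int.floordiv (page - 1) chunk * chunk + 1
  "Pages " ++ PySem.Int.toStr start ++ "-" ++ PySem.Int.toStr (min (start + chunk - 1) max_page)

def pvMaxPage (pages : List Int) (total_pages : Option Int) : Int :=
  match total_pages with
  | some t => if t = 0 then (if pages = [] then 0 else (PySem.List.max? pages (fun y => y)).getD 0) else t
  | none => if pages = [] then 0 else (PySem.List.max? pages (fun y => y)).getD 0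

-- ===== PORT A =====
def get_page_distribution (positions : List (Int × Int)) (total_pages : Option Int) (chunk : Int) : List (String × Int) :=
  let pages := positions.foldl (fun acc pos => acc ++ [pos.1]) []
  let max_page := pvMaxPage pages total_pages
  let distribution := pages.foldl (fun d page =>
      let label := pvLabel chunk max_page page
      d.insert label (d.getD label 0 + 1)) PySem.Dict.empty
  distribution.items

-- ===== PORT B =====
-- B's helper _groups: extract the first label's group, recurse on the filtered rest.
def pvGroups : List String → List (String × Int)
  | [] => []
  | lab :: t =>
    let rest := (lab :: t).filter (fun x => x ≠ lab)
    ((lab, ((lab :: t).length : Int) - rest.length)) :: pvGroups rest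
termination_by l => l.length
decreasing_by
  simp only [List.filter_cons, decide_not, List.length_cons]
  have := List.length_filter_le (fun x => !decide (x = lab)) t
  simp_all

def get_page_distribution_alt (positions : List (Int × Int)) (total_pages : Option Int) (chunk : Int) : List (String × Int) :=
  let pages := positions.map (fun pos => pos.1)
  let max_page := pvMaxPage pages total_pages
  let labels := pages.map (fun page => pvLabel chunk max_page page)
  (PySem.Dict.ofList (pvGroups labels)).items

-- ===== PRECONDITION & SPEC =====
-- Pre_ excludes only chunk = 0 with nonempty positions, where Python A raises ZeroDivisionError.
def Pre_get_page_distribution (positions : List (Int × Int)) (total_pages : Option Int) (chunk : Int) : Prop := chunk ≠ 0 ∨ positions = []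
instance (positions : List (Int × Int)) (total_pages : Option Int) (chunk : Int) : Decidable (Pre_get_page_distribution positions total_pages chunk) := by unfold Pre_get_page_distribution; infer_instance
def pvWitness_get_page_distribution : (List (Int × Int)) × Option Int × Int := ([(1, 0), (3, 2), (7, 1)], some 10, 5)

def Spec_get_page_distribution (positions : List (Int × Int)) (total_pages : Option Int) (chunk : Int) (out : List (String × Int)) : Prop := out = get_page_distribution_alt positions total_pages chunk
instance (positions : List (Int × Int)) (total_pages : Option Int) (chunk : Int) (out : List (String × Int)) : Decidable (Spec_get_page_distribution positions total_pages chunk out) := by unfold Spec_get_page_distribution; infer_instance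

-- ===== CLAIM (what is proved, stated in full; the proofs are below) =====
def Claim_equal_get_page_distribution : Prop := ∀ (positions : List (Int × Int)) (total_pages : Option Int) (chunk : Int), Dom_get_page_distribution positions total_pages chunk → Pre_get_page_distribution positions total_pages chunk → Spec_get_page_distribution positions total_pages chunk (get_page_distribution positions total_pages chunk)

-- ===== LEMMAS AND PROOFS =====

-- Adding an element commutes with filtering a PySem set.
theorem pv_filter_add {α : Type} [DecidableEq α] (s : List α) (x : α) (p : α → Bool) :
    (PySem.Set.add s x).filter p = if p x then PySem.Set.add (s.filter p) x else s.filter p := by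
  rw [PySem.Set.add_eq_ite]
  by_cases hx : x ∈ s
  · simp only [hx, if_true]
    by_cases hp : p x
    · rw [if_pos hp, PySem.Set.add_of_mem (List.mem_filter.mpr ⟨hx, hp⟩)]
    · simp [hp]
  · simp only [hx, if_false, List.filter_append, List.filter_cons, List.filter_nil]
    by_cases hp : p x
    · rw [if_pos hp, if_pos hp,
        PySem.Set.add_of_not_mem (fun h => hx (List.mem_filter.mp h).1)]
    · simp [hp]

-- Deduplication commutes with filtering.
theorem pv_foldl_add_filter {α : Type} [DecidableEq α] (t : List α) (s : List α) (p : α → Bool) :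
    (t.foldl PySem.Set.add s).filter p = (t.filter p).foldl PySem.Set.add (s.filter p) := by
  induction t generalizing s with
  | nil => rfl
  | cons x t ih =>
    simp only [List.foldl_cons, List.filter_cons]
    rw [ih, pv_filter_add]
    by_cases hp : p x <;> simp [hp]

theorem pv_dedup_filter {α : Type} [DecidableEq α] (t : List α) (p : α → Bool) :
    PySem.List.dedup (t.filter p) = (PySem.List.dedup t).filter p := by
  simp only [PySem.List.dedup_eq_ofList, PySem.Set.ofList_eq_foldl]
  rw [pv_foldl_add_filter]
  rfl

-- dedup of a cons: the head, then dedup of the tail with the head filtered out.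
theorem pv_dedup_cons {α : Type} [DecidableEq α] (x : α) (t : List α) :
    PySem.List.dedup (x :: t) = x :: PySem.List.dedup (t.filter (fun y => y ≠ x)) := by
  have hsplit : x :: t = [x] ++ t := rfl
  rw [pv_dedup_filter, hsplit, PySem.List.dedup_eq_ofList, PySem.Set.ofList_append]
  have h1 : PySem.Set.ofList [x] = [x] := rfl
  rw [h1, PySem.Set.update_eq_append_filter]
  simp only [PySem.List.dedup_eq_ofList, List.singleton_append]
  congr 1
  apply List.filter_congr
  intro a _
  by_cases hax : a = x <;> simp [PySem.Set.contains_eq_listContains, hax]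

-- The extract-group recursion computes exactly (first occurrence, total count) per label.
theorem pv_groups_eq (labels : List String) :
    pvGroups labels
      = (PySem.List.dedup labels).map (fun lab => (lab, (labels.count lab : Int))) := by
  generalize hn : labels.length = n
  induction n using Nat.strong_induction_on generalizing labels with
  | _ n ih =>
  match labels, hn with
  | [], _ => rw [pvGroups]; rfl
  | lab :: t, hn =>
    rw [pvGroups, pv_dedup_cons]
    set rest := (lab :: t).filter (fun x => x ≠ lab) with hrestdef
    have hrest : rest = t.filter (fun y => y ≠ lab) := by
      simp [hrestdef]
    have hlt : rest.length < n := by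
      rw [← hn, hrest, List.length_cons]
      exact Nat.lt_succ_of_le (List.length_filter_le _ t)
    simp only [List.map_cons]
    refine List.cons_eq_cons.mpr ⟨?_, ?_⟩
    · -- head: length difference = count of lab
      have h1 : rest.length = t.countP (fun y => decide (y ≠ lab)) := by
        rw [hrest, List.countP_eq_length_filter]
      have h2 : t.countP (fun y => decide (y ≠ lab)) + t.count lab = t.length := by
        have hsum := List.length_eq_countP_add_countP (fun y => decide (y ≠ lab)) (l := t)
        have hc : t.countP (fun a => decide ¬(decide (a ≠ lab) = true)) = t.count lab := by
          apply List.countP_congr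
          intro a _
          by_cases h : a = lab <;> simp [h]
        omega
      have h3 : (lab :: t).count lab = t.count lab + 1 := by simp
      have h4 : rest.length + (lab :: t).count lab = (lab :: t).length := by
        rw [h1, h3, List.length_cons]
        omega
      have h5 : ((lab :: t).length : Int) - (rest.length : Int) = ((lab :: t).count lab : Int) := by
        omega
      exact congrArg (fun z => (lab, z)) h5
    · -- tail: counts over the filtered list agree for labels ≠ lab
      rw [ih rest.length hlt rest rfl, hrest]
      apply List.map_congr_left
      intro a ha
      have hane : a ≠ lab := by
        have hm : a ∈ t.filter (fun y => decide (y ≠ lab)) := (PySem.List.mem_dedup _ _).mp ha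
        simpa using (List.mem_filter.mp hm).2
      have hcnt : (t.filter (fun y => decide (y ≠ lab))).count a = (lab :: t).count a := by
        rw [List.count_filter (by simpa using hane)]
        simp [Ne.symm hane]
      rw [hcnt]

-- B's OrderedDict is built over pairs with distinct keys, so its items are just the pairs.
theorem pv_items_ofList_nodup {ν : Type} (ps : List (String × ν)) (h : (ps.map Prod.fst).Nodup) :
    (PySem.Dict.ofList ps).items = ps := by
  have := PySem.Dict.items_foldl_insert_fresh ps Prod.fst Prod.snd PySem.Dict.empty
    (by intro a _; simp [PySem.Dict.contains_empty]) h
  simpa [PySem.Dict.ofList, PySem.Dict.update] using this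

-- A's counting loop, as items, equals B's partition groups.
theorem pv_core (labels : List String) :
    (labels.foldl (fun d label => d.insert label (d.getD label 0 + 1)) PySem.Dict.empty).items
      = (PySem.Dict.ofList (pvGroups labels)).items := by
  rw [PySem.Dict.foldl_insert_getD_add_one_eq_counter, PySem.Dict.items_counter,
    pv_groups_eq, pv_items_ofList_nodup]
  · simp [PySem.List.dedup_eq_ofList]
  · simp only [List.map_map, PySem.List.dedup_eq_ofList]
    have h : (Prod.fst ∘ fun lab => (lab, (List.count lab labels : Int))) = id := rfl
    rw [h, List.map_id]
    exact PySem.Set.nodup_ofList labels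

theorem pv_core2 (pages : List Int) (L : Int → String) :
    (pages.foldl (fun d page => d.insert (L page) (d.getD (L page) 0 + 1)) PySem.Dict.empty).items
      = (PySem.Dict.ofList (pvGroups (pages.map L))).items := by
  have h := pv_core (pages.map L)
  rw [List.foldl_map] at h
  simpa using h

-- ===== VERDICT (by name: the statement is the Claim_ definition above) =====
theorem get_page_distribution_spec : Claim_equal_get_page_distribution := by
  intro positions total_pages chunk _ _
  unfold Spec_get_page_distribution get_page_distribution get_page_distribution_alt
  rw [PySem.List.foldl_append_singleton_eq_map]
  simp only [List.nil_append]
  exact pv_core2 _ _
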